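-- pv_equiv track=rewrite | github.com/feller/learn-py | utils/compare_files.py | calculate_intersaction
-- ===== SOURCE A (Python) =====
-- def calculate_intersaction(list):
--     a = None
--     for x in list:
--         xset = set(x.keys())
--         if a is None:
--             a = xset
--         a = a.intersection(xset)
--     return a
-- ===== SOURCE B (Python) =====
-- def calculate_intersaction(list):
--     if not list:
--         return None
--     first, *rest = list
--     return {k for k in first if all(k in d for d in rest)}
-- ===== Notes on version B (the rewrite author's own statement) =====
-- stated objective: simpler
-- what changed: Replaces the fold of pairwise set intersections (building an intermediate set per dict) with a single set comprehension over the first dict's keys filtered by membership in every remaining dict, with an explicit empty-list guard.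
import Mathlib
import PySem

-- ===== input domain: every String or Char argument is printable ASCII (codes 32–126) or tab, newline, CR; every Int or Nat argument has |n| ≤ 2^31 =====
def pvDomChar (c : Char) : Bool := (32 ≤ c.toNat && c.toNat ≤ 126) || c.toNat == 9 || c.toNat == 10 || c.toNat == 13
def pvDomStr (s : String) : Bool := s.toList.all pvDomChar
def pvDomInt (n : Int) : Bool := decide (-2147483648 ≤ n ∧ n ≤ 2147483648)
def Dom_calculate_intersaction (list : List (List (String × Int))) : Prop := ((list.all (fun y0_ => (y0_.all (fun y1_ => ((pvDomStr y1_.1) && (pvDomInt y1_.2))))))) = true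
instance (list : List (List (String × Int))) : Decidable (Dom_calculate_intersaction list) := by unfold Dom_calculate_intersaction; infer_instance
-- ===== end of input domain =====

-- B replaces A's fold of pairwise set intersections by one filtering pass over the
-- first dict's keys, testing membership in every remaining dict (objective: simpler).

-- ===== PORT A =====
def calculate_intersaction (list : List (List (String × Int))) : Option (List String) :=
  list.foldl (fun a x =>
    let xset : PySem.Set String := PySem.Set.ofList (PySem.Dict.ofList x).keys
    let a := if a.isSome then a else some xset
    match a with
    | some s => some (PySem.Set.inter s xset)
    | none => none) none

-- ===== PORT B =====
-- the set comprehension is built as PySem.Set.ofList of the filtered key list (result compared as a set)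
def calculate_intersaction_alt (list : List (List (String × Int))) : Option (List String) :=
  match list with
  | [] => none
  | first :: rest =>
    some (PySem.Set.ofList ((PySem.Dict.ofList first).keys.filter
      (fun k => rest.all (fun d => (PySem.Dict.ofList d).contains k))))

-- ===== PRECONDITION & SPEC =====
def Spec_calculate_intersaction (list : List (List (String × Int))) (out : Option (List String)) : Prop := out = calculate_intersaction_alt list
instance (list : List (List (String × Int))) (out : Option (List String)) : Decidable (Spec_calculate_intersaction list out) := by unfold Spec_calculate_intersaction; infer_instance

-- ===== CLAIM (what is proved, stated in full; the proofs are below) =====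
def Claim_equal_calculate_intersaction : Prop := ∀ (list : List (List (String × Int))), Dom_calculate_intersaction list → Spec_calculate_intersaction list (calculate_intersaction list)

-- ===== LEMMAS AND PROOFS =====

-- dict membership test equals membership in the key set built from the keys
theorem contains_ofList_keys (x : List (String × Int)) (k : String) :
    PySem.Set.contains (PySem.Set.ofList (PySem.Dict.ofList x).keys) k
      = (PySem.Dict.ofList x).contains k := by
  rcases h : (PySem.Dict.ofList x).contains k with _ | _
  · rw [PySem.Set.contains_eq_listContains]
    simp only [List.contains_eq_mem, decide_eq_false_iff_not, PySem.Set.mem_ofList]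
    intro hmem
    rw [(PySem.Dict.contains_iff_mem_keys _ _).mpr hmem] at h
    simp at h
  · rw [PySem.Set.contains_eq_listContains]
    simp only [List.contains_eq_mem, decide_eq_true_eq, PySem.Set.mem_ofList]
    exact (PySem.Dict.contains_iff_mem_keys _ _).mp h

-- the loop over the remaining dicts intersects down to one filter by all-membership
theorem foldl_inter_eq_filter (rest : List (List (String × Int))) (s : List String) :
    rest.foldl (fun a x =>
      let xset : PySem.Set String := PySem.Set.ofList (PySem.Dict.ofList x).keys
      let a := if a.isSome then a else some xset
      match a with
      | some s => some (PySem.Set.inter s xset)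
      | none => none) (some s)
    = some (s.filter (fun k => rest.all (fun d => (PySem.Dict.ofList d).contains k))) := by
  induction rest generalizing s with
  | nil => simp
  | cons d ds ih =>
    simp only [List.foldl_cons, Option.isSome_some, if_true, List.all_cons]
    rw [ih]
    congr 1
    show (PySem.Set.inter s _ : List String).filter _ = _
    rw [show (PySem.Set.inter s (PySem.Set.ofList (PySem.Dict.ofList d).keys) : List String)
          = s.filter (fun k => PySem.Set.contains (PySem.Set.ofList (PySem.Dict.ofList d).keys) k) from rfl]
    rw [List.filter_filter]
    apply List.filter_congr
    intro k _
    rw [contains_ofList_keys, Bool.and_comm]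

-- s & s = s for a nodup set (the first loop iteration of A)
theorem inter_self_of_nodup (s : PySem.Set String) :
    PySem.Set.inter s s = s := by
  show s.filter (fun k => PySem.Set.contains s k) = s
  apply List.filter_eq_self.mpr
  intro a ha
  exact (PySem.Set.contains_iff _ _).mpr ha

-- ===== VERDICT (by name: the statement is the Claim_ definition above) =====
theorem calculate_intersaction_spec : Claim_equal_calculate_intersaction := by
  intro list _
  unfold Spec_calculate_intersaction calculate_intersaction calculate_intersaction_alt
  cases list with
  | nil => rfl
  | cons first rest =>
    simp only [List.foldl_cons, Option.isSome_none, Bool.false_eq_true, if_false]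
    rw [inter_self_of_nodup]
    rw [foldl_inter_eq_filter]
    congr 1
    have hnd : ((PySem.Dict.ofList first).keys).Nodup := PySem.Dict.nodup_keys_ofList _
    rw [PySem.Set.ofList_eq_self_of_nodup _ hnd,
        PySem.Set.ofList_eq_self_of_nodup _ (List.Nodup.filter _ hnd)]
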